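-- pv_equiv track=rewrite | github.com/AuroraViola/HW2req | program01.py | xkcd_to_list_of_weights
-- ===== SOURCE A (Python) =====
-- def xkcd_to_list_of_weights(xkcd : str) -> list[int]:
--     newlist = []
--     exp = 0
--     for i in reversed(range(len(xkcd))):
--         if xkcd[i] != "0":
--             newlist.append(int(xkcd[i]) * 10**exp)
--             if exp != 0:
--                 exp = 0
--         else:
--             exp += 1
--     return newlist[::-1]
-- ===== SOURCE B (Python) =====
-- def xkcd_to_list_of_weights(xkcd: str) -> list[int]:
--     weights = []
--     for ch in xkcd:
--         if ch != "0":
--             weights.append(int(ch))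
--         elif weights:
--             weights[-1] *= 10
--     return weights
-- ===== Notes on version B (the rewrite author's own statement) =====
-- stated objective: simpler
-- what changed: B replaces A's right-to-left scan with an exponent accumulator, powers of ten and a final reversal by one forward pass that appends each nonzero digit and multiplies the last appended value by 10 for every following zero.
import Mathlib
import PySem

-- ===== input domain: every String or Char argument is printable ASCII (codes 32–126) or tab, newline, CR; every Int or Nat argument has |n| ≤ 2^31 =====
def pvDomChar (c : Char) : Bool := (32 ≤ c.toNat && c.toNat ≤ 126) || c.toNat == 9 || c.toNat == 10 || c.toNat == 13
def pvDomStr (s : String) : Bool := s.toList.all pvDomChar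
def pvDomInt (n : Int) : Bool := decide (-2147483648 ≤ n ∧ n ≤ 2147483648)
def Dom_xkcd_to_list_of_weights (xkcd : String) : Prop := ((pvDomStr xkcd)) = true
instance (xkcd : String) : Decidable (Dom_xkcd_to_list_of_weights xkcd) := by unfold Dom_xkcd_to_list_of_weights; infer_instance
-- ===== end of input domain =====

-- B replaces A's right-to-left scan with an exponent counter and final reversal by one
-- forward pass that multiplies the last appended digit by 10 for each following zero (simpler).

-- ===== PORT A =====
-- int(str(c)) for a single char; exact on digit chars (guaranteed by Pre_)
def pvDigitA (c : Char) : Int := (PySem.Int.ofStr? (String.ofList [c])).getD 0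

-- loop body of A: state = (newlist, exp)
def pvStepA (cs : List Char) (st : List Int × Nat) (i : Int) : List Int × Nat :=
  match PySem.List.pyGet? cs i with
  | some c =>
      if c ≠ '0' then
        (st.1 ++ [pvDigitA c * 10 ^ st.2], 0)
      else
        (st.1, st.2 + 1)
  | none => st

def xkcd_to_list_of_weights (xkcd : String) : List Int :=
  let cs := xkcd.toList
  -- for i in reversed(range(len(xkcd)))
  let st := ((PySem.List.pyRange 0 (PySem.Str.len xkcd) 1).reverse).foldl (pvStepA cs) ([], 0)
  -- newlist[::-1]
  (PySem.List.slice? st.1 none none (-1)).getD []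

-- ===== PORT B =====
-- int(ch) for a single char; exact on digit chars (guaranteed by Pre_)
def pvDigitB (c : Char) : Int := (PySem.Int.ofStr? (String.ofList [c])).getD 0

-- loop body of B: append the digit, or multiply the last element by 10
def pvStepB (acc : List Int) (c : Char) : List Int :=
  if c ≠ '0' then acc ++ [pvDigitB c]
  else if acc = [] then acc
  else acc.dropLast ++ [acc.getLast! * 10]

def xkcd_to_list_of_weights_alt (xkcd : String) : List Int :=
  xkcd.toList.foldl pvStepB []

-- ===== PRECONDITION & SPEC =====
-- Pre_ excludes exactly the inputs where Python A raises ValueError: int(c) on a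
-- non-digit character (B raises there too).
def Pre_xkcd_to_list_of_weights (xkcd : String) : Prop :=
  xkcd.toList.all Char.isDigit = true
instance (xkcd : String) : Decidable (Pre_xkcd_to_list_of_weights xkcd) := by
  unfold Pre_xkcd_to_list_of_weights; infer_instance

def pvWitness_xkcd_to_list_of_weights : String := "105"

def Spec_xkcd_to_list_of_weights (xkcd : String) (out : List Int) : Prop := out = xkcd_to_list_of_weights_alt xkcd
instance (xkcd : String) (out : List Int) : Decidable (Spec_xkcd_to_list_of_weights xkcd out) := by unfold Spec_xkcd_to_list_of_weights; infer_instance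

-- ===== CLAIM (what is proved, stated in full; the proofs are below) =====
def Claim_equal_xkcd_to_list_of_weights : Prop := ∀ (xkcd : String), Dom_xkcd_to_list_of_weights xkcd → Pre_xkcd_to_list_of_weights xkcd → Spec_xkcd_to_list_of_weights xkcd (xkcd_to_list_of_weights xkcd)

-- ===== LEMMAS AND PROOFS =====

-- the two ports' digit conversions coincide (same Python expression)
theorem digitB_eq (c : Char) : pvDigitB c = pvDigitA c := rfl

-- reference function: number of leading '0' characters
def pvLZ : List Char → Nat
  | [] => 0
  | c :: rest => if c = '0' then pvLZ rest + 1 else 0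

-- reference function: the common value of both programs
def pvSpecList : List Char → List Int
  | [] => []
  | c :: rest => if c = '0' then pvSpecList rest
                 else pvDigitA c * 10 ^ pvLZ rest :: pvSpecList rest

-- A's fold over in-range indices is the fold of the corresponding characters
theorem foldA_indices (cs : List Char) (l : List Nat) (h : ∀ i ∈ l, i < cs.length)
    (init : List Int × Nat) :
    (l.map (Int.ofNat)).foldl (pvStepA cs) init
      = (l.map (fun i => cs.getD i ' ')).foldl
          (fun st c => if c ≠ '0' then (st.1 ++ [pvDigitA c * 10 ^ st.2], 0) else (st.1, st.2 + 1))
          init := by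
  induction l generalizing init with
  | nil => rfl
  | cons i rest ih =>
      have hi : i < cs.length := h i (by simp)
      have : pvStepA cs init (Int.ofNat i)
          = (if cs.getD i ' ' ≠ '0' then (init.1 ++ [pvDigitA (cs.getD i ' ') * 10 ^ init.2], 0)
             else (init.1, init.2 + 1)) := by
        unfold pvStepA
        rw [show (Int.ofNat i) = ((i : Nat) : Int) from rfl, PySem.List.pyGet?_natCast]
        simp [List.getD, hi]
      simp only [List.map_cons, List.foldl_cons, this]
      exact ih (fun j hj => h j (by simp [hj])) _

-- the characters read at indices (range n).reverse are cs.reverse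
theorem map_getD_range (cs : List Char) :
    (List.range cs.length).map (fun i => cs.getD i ' ') = cs := by
  induction cs with
  | nil => rfl
  | cons c rest ih =>
      simp only [List.length_cons, List.range_succ_eq_map, List.map_cons, List.map_map]
      exact congrArg (c :: ·) ih

-- the right-to-left fold of A computes (pvSpecList cs).reverse with exp = pvLZ cs
theorem foldA_spec (cs : List Char) :
    cs.reverse.foldl
        (fun (st : List Int × Nat) c =>
          if c ≠ '0' then (st.1 ++ [pvDigitA c * 10 ^ st.2], 0) else (st.1, st.2 + 1))
        ([], 0)
      = ((pvSpecList cs).reverse, pvLZ cs) := by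
  induction cs with
  | nil => rfl
  | cons c rest ih =>
      simp only [List.reverse_cons, List.foldl_append, ih, List.foldl_cons, List.foldl_nil]
      by_cases hc : c = '0'
      · simp [hc, pvSpecList, pvLZ]
      · simp [hc, pvSpecList, pvLZ]

-- B's fold with a nonempty accumulator
theorem foldB_spec (cs : List Char) (pre : List Int) (x : Int) :
    cs.foldl pvStepB (pre ++ [x]) = pre ++ [x * 10 ^ pvLZ cs] ++ pvSpecList cs := by
  induction cs generalizing pre x with
  | nil => simp [pvLZ, pvSpecList]
  | cons c rest ih =>
      by_cases hc : c = '0'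
      · subst hc
        have hstep : pvStepB (pre ++ [x]) '0' = pre ++ [x * 10] := by simp [pvStepB]
        rw [List.foldl_cons, hstep, ih]
        simp [pvLZ, pvSpecList, pow_succ]
        ring_nf
      · have hstep : pvStepB (pre ++ [x]) c = (pre ++ [x]) ++ [pvDigitA c] := by
          simp [pvStepB, hc, digitB_eq]
        rw [List.foldl_cons, hstep, ih]
        simp [pvLZ, pvSpecList, hc]

theorem foldB_nil (cs : List Char) : cs.foldl pvStepB [] = pvSpecList cs := by
  induction cs with
  | nil => rfl
  | cons c rest ih =>
      by_cases hc : c = '0'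
      · subst hc
        have h0 : pvStepB [] '0' = [] := by simp [pvStepB]
        rw [List.foldl_cons, h0, ih]
        simp [pvSpecList]
      · have h0 : pvStepB [] c = [] ++ [pvDigitA c] := by simp [pvStepB, hc, digitB_eq]
        rw [List.foldl_cons, h0, foldB_spec]
        simp [pvSpecList, hc]

-- ===== VERDICT (by name: the statement is the Claim_ definition above) =====
theorem xkcd_to_list_of_weights_spec : Claim_equal_xkcd_to_list_of_weights := by
  intro xkcd _ _
  unfold Spec_xkcd_to_list_of_weights xkcd_to_list_of_weights xkcd_to_list_of_weights_alt
  show (PySem.List.slice?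
      (((PySem.List.pyRange 0 (PySem.Str.len xkcd) 1).reverse).foldl
        (pvStepA xkcd.toList) ([], 0)).1 none none (-1)).getD []
    = xkcd.toList.foldl pvStepB []
  rw [PySem.List.slice?_none_none_neg_one]
  have hrange : PySem.List.pyRange 0 (PySem.Str.len xkcd) 1
      = (List.range xkcd.toList.length).map (Int.ofNat) := by
    rw [PySem.List.pyRange_one]
    simp [PySem.Str.len]
  rw [hrange, ← List.map_reverse, foldA_indices _ _ (fun i hi => by
        simpa using List.mem_range.mp (List.mem_reverse.mp hi)),
      List.map_reverse, map_getD_range, foldA_spec, foldB_nil]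
  simp
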